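-- pv_equiv track=rewrite | github.com/qzeleza/zezl | zezl/libraries/main/tools.py | get_inside
-- ===== SOURCE A (Python) =====
-- def get_inside(checking_list: list, source: str) -> list:
--     """
--     Функция возвращает, совпадающие подстроки в строке источнике, если они
--     совпадают полностью или частично с одним из элементов из списка.
--
--     :param checking_list: список элементов для проверки, которые ищутся в строке источнике source.
--     :param source: строка-источник в которой ищется совпадение элементов из списка - checking_list.
--
--     :return: список элементов, которые совпали с оригиналами и содержится в списке искомых элементов
--     """
--
--     # Проверяем на наличие записей
--     if source:
--         #  переводим все в нижний регистр
--         _source = source.lower().split()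
--         source_ = source.split()
--         result = []
--         #  Проверяем наличие
--         # result = [(sub_src for sub_fnd, sub_src in zip(_source, source_) if elem.lower() in sub_fnd) for elem in
--         #           checking_list]
--         for elem in checking_list:
--             # объедением элементы списков для того, чтобы возвратить
--             # именно исходный текст с сохранением регистра
--             for sub_fnd, sub_src in zip(_source, source_):
--                 # проверяем на совпадение
--                 if elem.lower() in sub_fnd:
--                     result.append(sub_src)
--     else:
--         #  если нет записей возвращаем пустой список
--         result = []
--
--     return result
-- ===== SOURCE B (Python) =====
-- def get_inside(checking_list: list, source: str) -> list:
--     # Substring inverted index: one pass over the source words builds a dict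
--     # mapping each pattern-relevant word substring to the matching words;
--     # every pattern is then answered by a single dict lookup.
--     pats = [elem.lower() for elem in checking_list]
--     patset = set(pats)
--     lengths = list(dict.fromkeys(len(p) for p in pats))
--     index = {}
--     for lw, w in zip(source.lower().split(), source.split()):
--         for s in dict.fromkeys(lw[i:i + L] for L in lengths for i in range(len(lw) - L + 1) if lw[i:i + L] in patset):
--             index.setdefault(s, []).append(w)
--     out = []
--     for p in pats:
--         out += index.get(p, [])
--     return out
-- ===== Notes on version B (the rewrite author's own statement) =====
-- stated objective: alternative
-- what changed: A rescans every source word once per pattern with nested substring tests; B builds a substring inverted index in one pass over the words (a dict from each pattern-relevant word substring, filtered through a pattern set and deduplicated per word, to the matching words) and answers each pattern by a single dict lookup.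
import Mathlib
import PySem

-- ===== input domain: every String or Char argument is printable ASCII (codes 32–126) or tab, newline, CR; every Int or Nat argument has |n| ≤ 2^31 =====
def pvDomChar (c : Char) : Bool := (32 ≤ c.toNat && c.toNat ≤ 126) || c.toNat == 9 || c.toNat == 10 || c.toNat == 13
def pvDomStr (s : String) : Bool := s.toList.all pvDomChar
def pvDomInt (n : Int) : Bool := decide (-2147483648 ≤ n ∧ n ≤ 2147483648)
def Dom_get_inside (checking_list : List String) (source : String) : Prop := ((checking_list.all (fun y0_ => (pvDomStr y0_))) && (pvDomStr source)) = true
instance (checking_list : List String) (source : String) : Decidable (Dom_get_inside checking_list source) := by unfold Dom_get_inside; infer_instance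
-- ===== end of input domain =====

-- B replaces A's pattern-by-pattern rescan of the word list with a substring inverted
-- index: one pass over the words inserts each word under every substring key of a
-- relevant length, and each pattern is then answered by a single dict lookup
-- (objective: alternative; same result, different algorithm and data structure).

-- ===== PORT A =====
def get_inside (checking_list : List String) (source : String) : List String :=
  if source ≠ "" then
    -- _source = source.lower().split(); source_ = source.split(); nested for-loops appending
    checking_list.foldl (fun result elem =>
      ((PySem.Str.split₀ (PySem.Str.lower source)).zip (PySem.Str.split₀ source)).foldl
        (fun r q => if PySem.Str.isIn (PySem.Str.lower elem) q.1 then r ++ [q.2] else r)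
        result) []
  else []

-- ===== PORT B =====
def get_inside_alt (checking_list : List String) (source : String) : List String :=
  -- pats = lowered patterns; lengths = dict.fromkeys of their lengths (PySem.List.dedup);
  -- index: for each word (lw, w), setdefault(s, []).append(w)  (= Dict.modify s [] (· ++ [w]))
  -- for every deduplicated relevant-length substring s of lw; then one lookup per pattern.
  let pats := checking_list.map PySem.Str.lower
  let patset := PySem.Set.ofList pats
  let lengths := PySem.List.dedup (pats.map PySem.Str.len)
  let index := ((PySem.Str.split₀ (PySem.Str.lower source)).zip (PySem.Str.split₀ source)).foldl
    (fun d q =>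
      (PySem.List.dedup (lengths.flatMap (fun L =>
        ((PySem.List.pyRange 0 (PySem.Str.len q.1 - L + 1) 1).filter (fun i =>
            patset.contains (PySem.Str.slice q.1 (some i) (some (i + L))))).map
          (fun i => PySem.Str.slice q.1 (some i) (some (i + L)))))).foldl
        (fun d s => d.modify s [] (· ++ [q.2])) d)
    PySem.Dict.empty
  pats.foldl (fun out p => out ++ index.getD p []) []

-- ===== PRECONDITION & SPEC =====
def Spec_get_inside (checking_list : List String) (source : String) (out : List String) : Prop := out = get_inside_alt checking_list source
instance (checking_list : List String) (source : String) (out : List String) : Decidable (Spec_get_inside checking_list source out) := by unfold Spec_get_inside; infer_instance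

-- ===== CLAIM (what is proved, stated in full; the proofs are below) =====
def Claim_equal_get_inside : Prop := ∀ (checking_list : List String) (source : String), Dom_get_inside checking_list source → Spec_get_inside checking_list source (get_inside checking_list source)

-- ===== LEMMAS AND PROOFS =====

-- the matches of one (lowered) pattern, in word order (the value of A's inner loop)
def pvSel (p : String) (ws : List (String × String)) : List String :=
  (ws.filter (fun q => PySem.Str.isIn p q.1)).map Prod.snd

-- the deduplicated pattern-relevant substring keys B generates for one lowered word
def pvKeys (patset : PySem.Set String) (lengths : List Int) (lw : String) : List String :=
  PySem.List.dedup (lengths.flatMap (fun L =>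
    ((PySem.List.pyRange 0 (PySem.Str.len lw - L + 1) 1).filter (fun i =>
        patset.contains (PySem.Str.slice lw (some i) (some (i + L))))).map
      (fun i => PySem.Str.slice lw (some i) (some (i + L)))))

-- A's nested loops compute, pattern by pattern, the concatenation of the match lists
theorem pvA_eq (checking_list : List String) (ws : List (String × String)) (acc : List String) :
    checking_list.foldl (fun result elem =>
      ws.foldl (fun r q =>
        if PySem.Str.isIn (PySem.Str.lower elem) q.1 then r ++ [q.2] else r) result) acc
    = acc ++ (checking_list.map (fun e => pvSel (PySem.Str.lower e) ws)).flatten := by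
  induction checking_list generalizing acc with
  | nil => simp
  | cons e cl ih =>
    simp only [List.foldl_cons, List.map_cons, List.flatten_cons]
    rw [PySem.List.foldl_append_if (fun q => PySem.Str.isIn (PySem.Str.lower e) q.1) Prod.snd ws acc,
      ih, List.append_assoc]
    rfl

-- membership in B's key list is exactly the substring test, for listed patterns
theorem pvKeys_mem (patset : PySem.Set String) (lengths : List Int)
    (hL : ∀ L ∈ lengths, 0 ≤ L) (lw p : String)
    (hp : PySem.Str.len p ∈ lengths) (hpat : patset.contains p = true) :
    p ∈ pvKeys patset lengths lw ↔ PySem.Str.isIn p lw = true := by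
  rw [pvKeys, PySem.List.mem_dedup, PySem.Str.isIn_iff_infix, List.mem_flatMap]
  constructor
  · rintro ⟨L, hLmem, hmap⟩
    rw [List.mem_map] at hmap
    obtain ⟨i, hif, hslice⟩ := hmap
    have hi := (List.mem_filter.mp hif).1
    rw [PySem.List.mem_pyRange_one] at hi
    have h0L := hL L hLmem
    have h0i := hi.1
    rw [← hslice]
    have : (PySem.Str.slice lw (some i) (some (i + L))).toList
        = List.take ((i+L).toNat - i.toNat) (List.drop i.toNat lw.toList) := by
      rw [PySem.Str.toList_slice, PySem.Chars.slice_eq_listSlice,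
        PySem.List.slice_toNat _ h0i (by omega)]
    rw [this]
    exact ((List.take_prefix _ _).isInfix).trans ((List.drop_suffix _ _).isInfix)
  · intro hinf
    rw [List.infix_iff_prefix_suffix] at hinf
    obtain ⟨t, hpt, hts⟩ := hinf
    obtain ⟨j, hj⟩ : ∃ j : Nat, t = List.drop j lw.toList ∧ j ≤ lw.toList.length :=
      ⟨lw.toList.length - t.length, List.suffix_iff_eq_drop.mp hts, by omega⟩
    have hlen : p.toList.length ≤ lw.toList.length - j := by
      have := hpt.length_le
      rw [hj.1, List.length_drop] at this
      omega
    have hslice : PySem.Str.slice lw (some (j : Int)) (some ((j : Int) + PySem.Str.len p)) = p := by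
      rw [← String.toList_inj, PySem.Str.toList_slice, PySem.Chars.slice_eq_listSlice,
        PySem.Str.len_eq, PySem.List.slice_natCast_add lw.toList j p.toList.length]
      rw [List.prefix_iff_eq_take] at hpt
      rw [hj.1] at hpt
      exact hpt.symm
    refine ⟨PySem.Str.len p, hp, List.mem_map.mpr
      ⟨(j : Int), List.mem_filter.mpr ⟨?_, by rw [hslice]; exact hpat⟩, hslice⟩⟩
    rw [PySem.List.mem_pyRange_one, PySem.Str.len_eq, PySem.Str.len_eq]
    exact ⟨by exact_mod_cast Int.natCast_nonneg j, by omega⟩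

-- one word's inner loop: appends the word under each of its (distinct) keys
theorem pvStep (ks : List String) (hnd : ks.Nodup) (w : String)
    (d : PySem.Dict String (List String)) (p : String) :
    (ks.foldl (fun d s => d.modify s [] (· ++ [w])) d).getD p []
    = d.getD p [] ++ (if p ∈ ks then [w] else []) := by
  have h := PySem.Dict.getD_foldl_modify_append (ks.map (fun s => (s, w))) d p
  rw [List.foldl_map] at h
  simp only at h
  rw [h, List.filter_map]
  have : (List.filter ((fun pr : String × String => pr.1 == p) ∘ fun s => (s, w)) ks)
      = ks.filter (fun s => s == p) := by rfl
  rw [this, List.filter_beq]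
  by_cases hmem : p ∈ ks
  · rw [List.count_eq_one_of_mem hnd hmem]
    simp [hmem]
  · rw [List.count_eq_zero_of_not_mem hmem]
    simp [hmem]

-- a lookup in the finished index is exactly that pattern's match list
theorem pvIndex_getD (ws : List (String × String)) (ks : String → List String)
    (hnd : ∀ lw, (ks lw).Nodup) (p : String)
    (hmem : ∀ lw, p ∈ ks lw ↔ PySem.Str.isIn p lw = true)
    (d : PySem.Dict String (List String)) :
    ((ws.foldl (fun d q => (ks q.1).foldl (fun d s => d.modify s [] (· ++ [q.2])) d) d).getD p [])
    = d.getD p [] ++ pvSel p ws := by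
  induction ws generalizing d with
  | nil => simp [pvSel]
  | cons q ws ih =>
    have hm := hmem q.1
    rw [List.foldl_cons, ih, pvStep _ (hnd q.1) q.2 d p]
    simp only [pvSel, List.filter_cons]
    by_cases h : PySem.Str.isIn p q.1 = true
    · rw [if_pos (hm.mpr h), if_pos h]; simp
    · rw [if_neg (fun c => h (hm.mp c)), if_neg h]; simp

-- B computes, pattern by pattern, the same concatenation of match lists
theorem pvB_eq (checking_list : List String) (source : String) :
    get_inside_alt checking_list source
    = ((checking_list.map PySem.Str.lower).map (fun p => pvSel p
        ((PySem.Str.split₀ (PySem.Str.lower source)).zip (PySem.Str.split₀ source)))).flatten := by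
  unfold get_inside_alt
  simp only []
  rw [PySem.List.foldl_append_eq_flatMap, List.nil_append, List.flatMap_def]
  apply congrArg
  apply List.map_congr_left
  intro p hp
  have hL : ∀ L ∈ PySem.List.dedup ((checking_list.map PySem.Str.lower).map PySem.Str.len),
      0 ≤ L := by
    intro L hLm
    rw [PySem.List.mem_dedup, List.mem_map] at hLm
    obtain ⟨s, _, rfl⟩ := hLm
    rw [PySem.Str.len_eq]
    exact_mod_cast Int.natCast_nonneg _
  have hplen : PySem.Str.len p ∈
      PySem.List.dedup ((checking_list.map PySem.Str.lower).map PySem.Str.len) := by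
    rw [PySem.List.mem_dedup]
    exact List.mem_map_of_mem hp
  have hpat : (PySem.Set.ofList (checking_list.map PySem.Str.lower)).contains p = true := by
    have : p ∈ PySem.Set.ofList (checking_list.map PySem.Str.lower) :=
      (PySem.Set.mem_ofList _ _).mpr hp
    simpa using this
  rw [show (((PySem.Str.split₀ (PySem.Str.lower source)).zip (PySem.Str.split₀ source)).foldl
      (fun d q =>
        (PySem.List.dedup ((PySem.List.dedup ((checking_list.map PySem.Str.lower).map PySem.Str.len)).flatMap (fun L =>
          ((PySem.List.pyRange 0 (PySem.Str.len q.1 - L + 1) 1).filter (fun i =>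
              (PySem.Set.ofList (checking_list.map PySem.Str.lower)).contains
                (PySem.Str.slice q.1 (some i) (some (i + L))))).map
            (fun i => PySem.Str.slice q.1 (some i) (some (i + L)))))).foldl
          (fun d s => d.modify s [] (· ++ [q.2])) d)
      PySem.Dict.empty)
    = (((PySem.Str.split₀ (PySem.Str.lower source)).zip (PySem.Str.split₀ source)).foldl
      (fun d q => (pvKeys (PySem.Set.ofList (checking_list.map PySem.Str.lower))
          (PySem.List.dedup ((checking_list.map PySem.Str.lower).map PySem.Str.len)) q.1).foldl
          (fun d s => d.modify s [] (· ++ [q.2])) d)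
      PySem.Dict.empty) from rfl]
  rw [pvIndex_getD ((PySem.Str.split₀ (PySem.Str.lower source)).zip (PySem.Str.split₀ source))
    (pvKeys (PySem.Set.ofList (checking_list.map PySem.Str.lower))
      (PySem.List.dedup ((checking_list.map PySem.Str.lower).map PySem.Str.len)))
    (fun lw => PySem.List.nodup_dedup _) p
    (fun lw => pvKeys_mem _ _ hL lw p hplen hpat)]
  simp [pysem]

theorem get_inside_eq_alt (checking_list : List String) (source : String) :
    get_inside checking_list source = get_inside_alt checking_list source := by
  rw [pvB_eq]
  unfold get_inside
  by_cases hs : source = ""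
  · subst hs
    simp [pvSel, show PySem.Str.split₀ (PySem.Str.lower "") = [] from rfl]
  · rw [if_pos hs, pvA_eq, List.nil_append, List.map_map]
    rfl

-- ===== VERDICT (by name: the statement is the Claim_ definition above) =====
theorem get_inside_spec : Claim_equal_get_inside := by
  intro checking_list source _
  unfold Spec_get_inside
  exact get_inside_eq_alt checking_list source
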